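-- pv_equiv track=rewrite | github.com/asmaahasnaoui/Problem_Solving | DynamicProgramming.py | gridTavellerTab
-- ===== SOURCE A (Python) =====
-- def gridTavellerTab(m, n):
--     tab2 = [[0 for _ in range(n + 1)] for _ in range(m + 1)]
--
--     # Base case: there is one way to reach (1, 1)
--     tab2[1][1] = 1
--
--     for i in range(0, m + 1):
--         for j in range(0, n + 1):
--             if i + 1 <= m:
--                 tab2[i + 1][j] += tab2[i][j]
--             if j + 1 <= n:
--                 tab2[i][j + 1] += tab2[i][j]
--     return tab2[m][n]
-- ===== SOURCE B (Python) =====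
-- def gridTavellerTab(m, n):
--     # Closed-form lattice-path count: C(m+n-2, min(m,n)-1), computed by an
--     # exact incremental product (each partial product is itself a binomial).
--     if m < 1 or n < 1:
--         raise ValueError("grid dimensions must be positive")
--     k = min(m, n) - 1
--     r = 1
--     for i in range(1, k + 1):
--         r = r * (m + n - 2 - k + i) // i
--     return r
-- ===== Notes on version B (the rewrite author's own statement) =====
-- stated objective: faster
-- what changed: Replaces the O(m*n) DP table with the closed-form binomial coefficient C(m+n-2, min(m,n)-1) computed by an exact O(min(m,n)) running product.
import Mathlib
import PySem

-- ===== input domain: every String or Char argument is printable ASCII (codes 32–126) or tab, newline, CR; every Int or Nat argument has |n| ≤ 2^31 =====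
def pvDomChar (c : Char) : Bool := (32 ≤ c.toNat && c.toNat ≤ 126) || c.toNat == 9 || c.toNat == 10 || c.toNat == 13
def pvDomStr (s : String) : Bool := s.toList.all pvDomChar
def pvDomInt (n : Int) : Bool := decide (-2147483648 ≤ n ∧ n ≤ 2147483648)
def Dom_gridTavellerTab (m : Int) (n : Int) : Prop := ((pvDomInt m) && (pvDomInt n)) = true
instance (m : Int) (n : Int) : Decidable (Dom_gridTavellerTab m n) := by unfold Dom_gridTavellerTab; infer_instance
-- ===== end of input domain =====

-- B replaces A's O(m·n) dynamic-programming table by the closed-form binomial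
-- coefficient C(m+n-2, min(m,n)-1), computed by an exact running product (objective: faster).

-- ===== PORT A =====
-- Python's list-of-lists table is represented as Array (Array Int); all indices
-- are nonnegative and in range on every input admitted by Pre_.
-- tab2[i][j]
def pvGet2 (t : Array (Array Int)) (i j : Int) : Int :=
  (t.getD i.toNat #[]).getD j.toNat 0

-- tab2[i][j] = v
def pvSet2 (t : Array (Array Int)) (i j : Int) (v : Int) : Array (Array Int) :=
  t.setIfInBounds i.toNat ((t.getD i.toNat #[]).setIfInBounds j.toNat v)

-- body of the inner `for j` loop
def pvInner (m n i : Int) (t : Array (Array Int)) (j : Int) : Array (Array Int) :=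
  let t1 := if i + 1 ≤ m then pvSet2 t (i+1) j (pvGet2 t (i+1) j + pvGet2 t i j) else t
  if j + 1 ≤ n then pvSet2 t1 i (j+1) (pvGet2 t1 i (j+1) + pvGet2 t1 i j) else t1

-- body of the outer `for i` loop
def pvOuter (m n : Int) (t : Array (Array Int)) (i : Int) : Array (Array Int) :=
  (PySem.List.pyRange 0 (n+1) 1).foldl (pvInner m n i) t

def gridTavellerTab (m : Int) (n : Int) : Int :=
  pvGet2
    ((PySem.List.pyRange 0 (m+1) 1).foldl (pvOuter m n)
      (pvSet2 (Array.replicate (m+1).toNat (Array.replicate (n+1).toNat 0)) 1 1 1))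
    m n

-- ===== PORT B =====
-- the ValueError guard: outside Pre_ the Python raises; the port returns 0 there
def gridTavellerTab_alt (m : Int) (n : Int) : Int :=
  if m < 1 ∨ n < 1 then 0 else
  let k := min m n - 1
  (PySem.List.pyRange 1 (k+1) 1).foldl
    (fun r i => PySem.Int.floordiv (r * (m + n - 2 - k + i)) i) 1

-- ===== PRECONDITION & SPEC =====
-- Python A raises IndexError (no cell (1,1) to seed) exactly when m < 1 or n < 1.
def Pre_gridTavellerTab (m : Int) (n : Int) : Prop := 1 ≤ m ∧ 1 ≤ n
instance (m : Int) (n : Int) : Decidable (Pre_gridTavellerTab m n) := by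
  unfold Pre_gridTavellerTab; infer_instance

def pvWitness_gridTavellerTab : Int × Int := (2, 3)

def Spec_gridTavellerTab (m : Int) (n : Int) (out : Int) : Prop := out = gridTavellerTab_alt m n
instance (m : Int) (n : Int) (out : Int) : Decidable (Spec_gridTavellerTab m n out) := by
  unfold Spec_gridTavellerTab; infer_instance

-- ===== CLAIM (what is proved, stated in full; the proofs are below) =====
def Claim_equal_gridTavellerTab : Prop := ∀ (m : Int) (n : Int), Dom_gridTavellerTab m n → Pre_gridTavellerTab m n → Spec_gridTavellerTab m n (gridTavellerTab m n)

-- ===== LEMMAS AND PROOFS =====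

-- List-level model of the Array operations (proof layer)
def pvGet2L (t : List (List Int)) (i j : Int) : Int :=
  (t.getD i.toNat []).getD j.toNat 0

def pvSet2L (t : List (List Int)) (i j : Int) (v : Int) : List (List Int) :=
  t.set i.toNat ((t.getD i.toNat []).set j.toNat v)

def pvInnerL (m n i : Int) (t : List (List Int)) (j : Int) : List (List Int) :=
  let t1 := if i + 1 ≤ m then pvSet2L t (i+1) j (pvGet2L t (i+1) j + pvGet2L t i j) else t
  if j + 1 ≤ n then pvSet2L t1 i (j+1) (pvGet2L t1 i (j+1) + pvGet2L t1 i j) else t1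

def pvOuterL (m n : Int) (t : List (List Int)) (i : Int) : List (List Int) :=
  (PySem.List.pyRange 0 (n+1) 1).foldl (pvInnerL m n i) t

def pvT (t : Array (Array Int)) : List (List Int) := t.toList.map Array.toList

lemma pv_arr_getD_row (a : Array (Array Int)) (i : Nat) :
    (a.getD i #[]).toList = (a.toList.map Array.toList).getD i [] := by
  have h1 : a.getD i #[] = a.toList.getD i #[] := by
    simp only [Array.getD, List.getD_eq_getElem?_getD]
    rcases Nat.lt_or_ge i a.size with h | h
    · simp [h]
    · simp [h, List.getElem?_eq_none, Nat.not_lt.mpr]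
  rw [h1]
  rcases Nat.lt_or_ge i a.toList.length with h | h
  · simp [List.getD_eq_getElem?_getD, List.getElem?_eq_getElem, h]
  · simp [List.getD_eq_getElem?_getD, List.getElem?_eq_none, h]

lemma pv_arr_getD_int (a : Array Int) (j : Nat) : a.getD j 0 = a.toList.getD j 0 := by
  simp only [Array.getD, List.getD_eq_getElem?_getD]
  rcases Nat.lt_or_ge j a.size with h | h
  · simp [h]
  · simp [h, List.getElem?_eq_none, Nat.not_lt.mpr]

lemma pvGet2_bridge (t : Array (Array Int)) (i j : Int) :
    pvGet2 t i j = pvGet2L (pvT t) i j := by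
  unfold pvGet2 pvGet2L pvT
  rw [pv_arr_getD_int, pv_arr_getD_row]

lemma pvSet2_bridge (t : Array (Array Int)) (i j : Int) (v : Int) :
    pvT (pvSet2 t i j v) = pvSet2L (pvT t) i j v := by
  unfold pvSet2 pvSet2L pvT
  rw [Array.toList_setIfInBounds, List.map_set, Array.toList_setIfInBounds,
      pv_arr_getD_row]

lemma pvInner_bridge (m n i : Int) (t : Array (Array Int)) (j : Int) :
    pvT (pvInner m n i t j) = pvInnerL m n i (pvT t) j := by
  simp only [pvInner, pvInnerL]
  split_ifs <;> simp only [pvSet2_bridge, pvGet2_bridge]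

lemma pvFold_bridge (f : Array (Array Int) → Int → Array (Array Int))
    (fL : List (List Int) → Int → List (List Int))
    (h : ∀ t j, pvT (f t j) = fL (pvT t) j) (l : List Int) (t : Array (Array Int)) :
    pvT (l.foldl f t) = l.foldl fL (pvT t) := by
  induction l generalizing t with
  | nil => rfl
  | cons x xs ih => simp only [List.foldl_cons, ih, h]

lemma pvOuter_bridge (m n : Int) (t : Array (Array Int)) (i : Int) :
    pvT (pvOuter m n t i) = pvOuterL m n (pvT t) i :=
  pvFold_bridge _ _ (pvInner_bridge m n i) _ t

lemma pvInit_bridge (M N : Nat) :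
    pvT (Array.replicate M (Array.replicate N (0:Int)))
      = List.replicate M (List.replicate N 0) := by
  simp [pvT]


def pvPN (a b : Nat) : Int := if a = 0 ∨ b = 0 then 0 else ((a + b - 2).choose (a - 1) : Int)

def pvI (a b : Nat) : Int := if a = 1 ∧ b = 1 then 1 else 0

def pvR (a b : Nat) : Int := pvI a b + (if a = 0 then 0 else pvPN (a-1) b)

def pvBuild (M N : Nat) (f : Nat → Nat → Int) : List (List Int) :=
  (List.range M).map (fun a => (List.range N).map (f a))

lemma pvGet2_build (M N : Nat) (f : Nat → Nat → Int) (i j : Int)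
    (hi : i.toNat < M) (hj : j.toNat < N) :
    pvGet2L (pvBuild M N f) i j = f i.toNat j.toNat := by
  simp [pvGet2L, pvBuild, List.getD_eq_getElem?_getD, List.getElem?_map, List.getElem?_range, hi, hj]

lemma pvSet2_build (M N : Nat) (f : Nat → Nat → Int) (i j : Int) (v : Int)
    (hi : i.toNat < M) (hj : j.toNat < N) :
    pvSet2L (pvBuild M N f) i j v
      = pvBuild M N (fun a b => if a = i.toNat ∧ b = j.toNat then v else f a b) := by
  unfold pvSet2L pvBuild
  apply List.ext_getElem
  · simp
  · intro a ha ha'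
    simp only [List.getElem_set, List.getD_eq_getElem?_getD, List.getElem?_map,
      List.getElem?_range, List.length_set, List.length_map, List.length_range] at *
    by_cases hai : a = i.toNat
    · subst hai
      simp [hi, List.getElem_map]
      apply List.ext_getElem
      · simp
      · intro b hb hb'
        simp only [List.getElem_set, List.getElem_map, List.getElem_range] at *
        simp only [List.length_map, List.length_range] at hb'
        by_cases hbj : b = j.toNat
        · subst hbj; simp [hb']
        · simp only [List.getElem_set, hbj, if_false]
          rw [if_neg (by omega)]
    · rw [if_neg (fun h => hai h.symm)]
      simp only [List.getElem_map, List.getElem_range]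
      apply List.map_congr_left
      intro b _
      rw [if_neg (by omega)]

lemma pvBuild_congr (M N : Nat) (f g : Nat → Nat → Int)
    (h : ∀ a, a < M → ∀ b, b < N → f a b = g a b) :
    pvBuild M N f = pvBuild M N g := by
  unfold pvBuild
  apply List.map_congr_left
  intro a ha
  rw [List.mem_range] at ha
  apply List.map_congr_left
  intro b hb
  rw [List.mem_range] at hb
  exact h a ha b hb

lemma pvKL (i j : Nat) : pvR i (j+1) + pvPN i j = pvPN i (j+1) := by
  match i, j with
  | 0, j => simp [pvR, pvI, pvPN]
  | 1, 0 => simp [pvR, pvI, pvPN]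
  | 1, j+1 => simp [pvR, pvI, pvPN]
  | i+2, 0 => simp [pvR, pvI, pvPN]
  | i+2, j+1 =>
    have h1 : (i+2) + (j+1) - 2 = i + j + 1 := by omega
    have h2 : (i+1) + (j+2) - 2 = i + j + 1 := by omega
    have h3 : (i+2) + (j+2) - 2 = i + j + 2 := by omega
    simp only [pvR, pvI, pvPN]
    norm_num [h1, h2, h3]
    have := Nat.choose_succ_succ (i + j + 1) i
    push_cast [this]
    ring

def pvG (i j a b : Nat) : Int :=
  if a < i then pvPN a b
  else if a = i then (if b ≤ j then pvPN a b else pvR a b)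
  else if a = i+1 then (if b < j then pvR a b else pvI a b)
  else pvI a b

lemma pvG_advance (I J a b : Nat) :
    (if a = I ∧ b = J+1 then pvPN I (J+1)
     else if a = I+1 ∧ b = J then pvR (I+1) J
     else pvG I J a b) = pvG I (J+1) a b := by
  by_cases h1 : a = I ∧ b = J+1
  · obtain ⟨rfl, rfl⟩ := h1
    rw [if_pos ⟨rfl, rfl⟩]
    unfold pvG
    split_ifs <;> first | rfl | omega
  · rw [if_neg h1]
    by_cases h2 : a = I+1 ∧ b = J
    · obtain ⟨rfl, rfl⟩ := h2
      rw [if_pos ⟨rfl, rfl⟩]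
      unfold pvG
      split_ifs <;> first | rfl | omega
    · rw [if_neg h2]
      unfold pvG
      split_ifs <;> first | rfl | omega

def pvF1 (I J : Nat) : Nat → Nat → Int :=
  fun a b => if a = I+1 ∧ b = J then pvR (I+1) J else pvG I J a b

lemma pvG_self_succ (I J : Nat) : pvG I J (I+1) J = pvI (I+1) J := by
  unfold pvG; split_ifs <;> first | rfl | omega

lemma pvG_self (I J : Nat) : pvG I J I J = pvPN I J := by
  unfold pvG; split_ifs <;> first | rfl | omega

lemma pvF1_right (I J : Nat) : pvF1 I J I (J+1) = pvR I (J+1) := by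
  unfold pvF1
  rw [if_neg (by omega)]
  unfold pvG; split_ifs <;> first | rfl | omega

lemma pvF1_self (I J : Nat) : pvF1 I J I J = pvPN I J := by
  unfold pvF1
  rw [if_neg (by omega)]
  exact pvG_self I J

lemma pvF1_advance (I J a b : Nat) :
    (if a = I ∧ b = J+1 then pvF1 I J I (J+1) + pvF1 I J I J else pvF1 I J a b)
      = pvG I (J+1) a b := by
  rw [pvF1_right, pvF1_self, pvKL]
  simp only [pvF1]
  exact pvG_advance I J a b

lemma pvInner_step (m n : Int) (i j : Int)
    (hi : 0 ≤ i) (him : i ≤ m) (hj : 0 ≤ j) (hjn : j ≤ n) :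
    pvInnerL m n i (pvBuild (m+1).toNat (n+1).toNat (pvG i.toNat j.toNat)) j
      = pvBuild (m+1).toNat (n+1).toNat (pvG i.toNat (j.toNat+1)) := by
  have hIM : i.toNat < (m+1).toNat := by omega
  have hJN : j.toNat < (n+1).toNat := by omega
  have hi1 : (i+1).toNat = i.toNat + 1 := by omega
  have hj1 : (j+1).toNat = j.toNat + 1 := by omega
  simp only [pvInnerL]
  have h1 : (if i + 1 ≤ m then
        pvSet2L (pvBuild (m+1).toNat (n+1).toNat (pvG i.toNat j.toNat)) (i+1) j
          (pvGet2L (pvBuild (m+1).toNat (n+1).toNat (pvG i.toNat j.toNat)) (i+1) j +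
           pvGet2L (pvBuild (m+1).toNat (n+1).toNat (pvG i.toNat j.toNat)) i j)
      else pvBuild (m+1).toNat (n+1).toNat (pvG i.toNat j.toNat))
      = pvBuild (m+1).toNat (n+1).toNat (pvF1 i.toNat j.toNat) := by
    by_cases hc : i + 1 ≤ m
    · have hI1 : (i+1).toNat < (m+1).toNat := by omega
      rw [if_pos hc, pvGet2_build _ _ _ _ _ hI1 hJN, pvGet2_build _ _ _ _ _ hIM hJN,
          pvSet2_build _ _ _ _ _ _ hI1 hJN, hi1]
      apply pvBuild_congr
      intro a ha b hb
      simp only [pvF1]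
      by_cases hab : a = i.toNat + 1 ∧ b = j.toNat
      · obtain ⟨rfl, rfl⟩ := hab
        rw [if_pos ⟨rfl, rfl⟩, if_pos ⟨rfl, rfl⟩, pvG_self_succ, pvG_self]
        simp [pvR]
      · rw [if_neg hab, if_neg hab]
    · rw [if_neg hc]
      apply pvBuild_congr
      intro a ha b hb
      simp only [pvF1]
      rw [if_neg (by omega)]
  rw [h1]
  by_cases hc : j + 1 ≤ n
  · have hJ1 : (j+1).toNat < (n+1).toNat := by omega
    rw [if_pos hc, pvGet2_build _ _ _ _ _ hIM hJ1, pvGet2_build _ _ _ _ _ hIM hJN,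
        pvSet2_build _ _ _ _ _ _ hIM hJ1, hj1]
    apply pvBuild_congr
    intro a ha b hb
    exact pvF1_advance i.toNat j.toNat a b
  · rw [if_neg hc]
    apply pvBuild_congr
    intro a ha b hb
    rw [← pvF1_advance i.toNat j.toNat a b, if_neg (by omega)]

lemma pvInner_loop (m n : Int) (i : Int) (hi : 0 ≤ i) (him : i ≤ m)
    (jc : Nat) (hjc : jc ≤ (n+1).toNat) :
    (PySem.List.pyRange 0 (jc : Int) 1).foldl (pvInnerL m n i)
        (pvBuild (m+1).toNat (n+1).toNat (pvG i.toNat 0))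
      = pvBuild (m+1).toNat (n+1).toNat (pvG i.toNat jc) := by
  induction jc with
  | zero => rw [PySem.List.pyRange_one_eq_nil (by omega)]; rfl
  | succ k ih =>
    have hk : k ≤ (n+1).toNat := by omega
    have : ((k : Int) + 1) = ((k + 1 : Nat) : Int) := by push_cast; ring
    rw [← this, PySem.List.pyRange_one_succ_right (by omega), List.foldl_append, ih hk]
    have hstep := pvInner_step m n i (k : Int) hi him (by omega) (by omega)
    rw [Int.toNat_natCast] at hstep
    simpa using hstep

lemma pvG_row_reset (m n : Int) (hn : 1 ≤ n) (ic : Nat) (a : Nat) (ha : a < (m+1).toNat)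
    (b : Nat) (hb : b < (n+1).toNat) :
    pvG ic (n+1).toNat a b = pvG (ic+1) 0 a b := by
  rcases Nat.eq_zero_or_pos b with rfl | hbpos
  · unfold pvG
    split_ifs <;> first | rfl | omega | simp [pvR, pvI, pvPN]
  · unfold pvG
    split_ifs <;> first | rfl | omega

lemma pvOuter_step (m n : Int) (hn : 1 ≤ n) (i : Int) (hi : 0 ≤ i) (him : i ≤ m) :
    pvOuterL m n (pvBuild (m+1).toNat (n+1).toNat (pvG i.toNat 0)) i
      = pvBuild (m+1).toNat (n+1).toNat (pvG (i.toNat+1) 0) := by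
  unfold pvOuterL
  rw [show PySem.List.pyRange 0 (n+1) 1 = PySem.List.pyRange 0 (((n+1).toNat : Nat) : Int) 1 from by
        rw [Int.toNat_of_nonneg (by omega)],
      pvInner_loop m n i hi him (n+1).toNat le_rfl]
  exact pvBuild_congr _ _ _ _ (pvG_row_reset m n hn i.toNat)

lemma pvOuter_loop (m n : Int) (hn : 1 ≤ n) (ic : Nat) (hic : ic ≤ (m+1).toNat) :
    (PySem.List.pyRange 0 (ic : Int) 1).foldl (pvOuterL m n)
        (pvBuild (m+1).toNat (n+1).toNat (pvG 0 0))
      = pvBuild (m+1).toNat (n+1).toNat (pvG ic 0) := by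
  induction ic with
  | zero => rw [PySem.List.pyRange_one_eq_nil (by omega)]; rfl
  | succ k ih =>
    have hk : k ≤ (m+1).toNat := by omega
    have : ((k : Int) + 1) = ((k + 1 : Nat) : Int) := by push_cast; ring
    rw [← this, PySem.List.pyRange_one_succ_right (by omega), List.foldl_append, ih hk]
    have hstep := pvOuter_step m n hn (k : Int) (by omega) (by omega)
    rw [Int.toNat_natCast] at hstep
    simpa using hstep

lemma pvInit (m n : Int) (hm : 1 ≤ m) (hn : 1 ≤ n) :
    pvSet2L (List.replicate (m+1).toNat (List.replicate (n+1).toNat 0)) 1 1 1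
      = pvBuild (m+1).toNat (n+1).toNat (pvG 0 0) := by
  have hrep : List.replicate (m+1).toNat (List.replicate (n+1).toNat (0:Int))
      = pvBuild (m+1).toNat (n+1).toNat (fun _ _ => 0) := by
    unfold pvBuild
    rw [List.map_const', List.map_const', List.length_range, List.length_range]
  rw [hrep, pvSet2_build _ _ _ 1 1 1 (by omega) (by omega)]
  apply pvBuild_congr
  intro a ha b hb
  unfold pvG pvR pvI pvPN
  split_ifs <;> first | rfl | omega

lemma pvA_eq_list (m n : Int) (hm : 1 ≤ m) (hn : 1 ≤ n) :
    pvGet2L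
      ((PySem.List.pyRange 0 (m+1) 1).foldl (pvOuterL m n)
        (pvSet2L (List.replicate (m+1).toNat (List.replicate (n+1).toNat 0)) 1 1 1))
      m n = pvPN m.toNat n.toNat := by
  rw [pvInit m n hm hn]
  rw [show PySem.List.pyRange 0 (m+1) 1 = PySem.List.pyRange 0 (((m+1).toNat : Nat) : Int) 1 from by
        rw [Int.toNat_of_nonneg (by omega)],
      pvOuter_loop m n hn (m+1).toNat le_rfl,
      pvGet2_build _ _ _ _ _ (by omega) (by omega)]
  unfold pvG
  split_ifs <;> first | rfl | omega

lemma pvA_eq (m n : Int) (hm : 1 ≤ m) (hn : 1 ≤ n) :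
    gridTavellerTab m n = pvPN m.toNat n.toNat := by
  unfold gridTavellerTab
  rw [pvGet2_bridge, pvFold_bridge _ _ (pvOuter_bridge m n), pvSet2_bridge,
      pvInit_bridge]
  exact pvA_eq_list m n hm hn

lemma pvB_loop (m n : Int) (hm : 1 ≤ m) (hn : 1 ≤ n) (tc : Nat)
    (htc : tc ≤ (min m n - 1).toNat) :
    (PySem.List.pyRange 1 ((tc : Int)+1) 1).foldl
        (fun r i => PySem.Int.floordiv (r * (m + n - 2 - (min m n - 1) + i)) i) 1
      = ((((m+n-2).toNat - (min m n - 1).toNat + tc).choose tc : Nat) : Int) := by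
  induction tc with
  | zero => rw [PySem.List.pyRange_one_eq_nil (by omega)]; simp
  | succ t ih =>
    have ht : t ≤ (min m n - 1).toNat := by omega
    have hcast : ((t + 1 : Nat) : Int) + 1 = ((t : Int) + 1) + 1 := by push_cast; ring
    rw [hcast, PySem.List.pyRange_one_succ_right (by omega), List.foldl_append, ih ht]
    simp only [List.foldl_cons, List.foldl_nil]
    have harg : m + n - 2 - (min m n - 1) + ((t : Int) + 1)
        = (((((m+n-2).toNat - (min m n - 1).toNat) + t + 1 : Nat) : Nat) : Int) := by
      push_cast; omega
    rw [harg]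
    set d := (m+n-2).toNat - (min m n - 1).toNat with hd
    have hnum : ((d + t).choose t : Int) * ((d + t + 1 : Nat) : Int)
        = (((d + t + 1).choose (t+1) * (t+1) : Nat) : Int) := by
      push_cast
      rw [show ((d + t).choose t : Int) * ((d:Int) + t + 1)
            = (((d + t + 1) * (d + t).choose t : Nat) : Int) from by push_cast; ring]
      norm_cast
      rw [← Nat.add_one_mul_choose_eq]
    rw [hnum]
    rw [show ((t:Int) + 1) = ((t + 1 : Nat) : Int) from by push_cast; ring,
        PySem.Int.floordiv_natCast, Nat.mul_div_cancel _ (by omega)]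
    norm_num [Nat.add_assoc]

lemma pvB_eq (m n : Int) (hm : 1 ≤ m) (hn : 1 ≤ n) :
    gridTavellerTab_alt m n = pvPN m.toNat n.toNat := by
  simp only [gridTavellerTab_alt]
  rw [if_neg (by omega)]
  rw [show min m n - 1 + 1 = (((min m n - 1).toNat : Nat) : Int) + 1 from by omega,
      pvB_loop m n hm hn (min m n - 1).toNat le_rfl]
  unfold pvPN
  rw [if_neg (by omega)]
  have haN : (m+n-2).toNat - (min m n - 1).toNat + (min m n - 1).toNat
      = m.toNat + n.toNat - 2 := by omega
  rw [haN]
  norm_cast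
  rcases le_total m n with hmn | hmn
  · rw [show (min m n - 1).toNat = m.toNat - 1 from by omega]
  · rw [show (min m n - 1).toNat = n.toNat - 1 from by omega,
        show n.toNat - 1 = (m.toNat + n.toNat - 2) - (m.toNat - 1) from by omega,
        Nat.choose_symm (by omega)]

-- ===== VERDICT (by name: the statement is the Claim_ definition above) =====
theorem gridTavellerTab_spec : Claim_equal_gridTavellerTab := by
  intro m n _ hpre
  unfold Spec_gridTavellerTab
  rw [pvA_eq m n hpre.1 hpre.2, pvB_eq m n hpre.1 hpre.2]
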